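-- pv_equiv track=rewrite | github.com/elzup/screen-sensor | utils/path_short.py | shorten_to_unique_suffix
-- ===== SOURCE A (Python) =====
-- def shorten_to_unique_suffix(strings):
--     n = len(strings)
--     # インデックス付きでソート（元の順序を保持するためにindexを取っておく）
--     indexed_strings = list(enumerate(strings))
--     indexed_strings.sort(key=lambda x: x[1])
--
--     def common_prefix_len(a, b):
--         i = 0
--         for x, y in zip(a, b):
--             if x == y:
--                 i += 1
--             else:
--                 break
--         return i
--
--     # prefix_length[i]は、i番目の要素が区別されるために残す必要がある最短接尾部を求めるための基準
--     prefix_length = [0] * n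
--
--     # 隣接要素間の共通接頭辞長を求め、それに基づきprefix_lengthを更新
--     for i in range(n - 1):
--         pl = common_prefix_len(indexed_strings[i][1], indexed_strings[i + 1][1])
--         idx1, s1 = indexed_strings[i]
--         idx2, s2 = indexed_strings[i + 1]
--         prefix_length[idx1] = max(prefix_length[idx1], pl)
--         prefix_length[idx2] = max(prefix_length[idx2], pl)
--
--     # 求めたprefix_lengthに従って各要素を切り詰める（prefix_length[i]文字を削る）
--     result = []
--     for i, s in enumerate(strings):
--         cut_pos = prefix_length[i]
--         result.append(s[cut_pos:])
--     return result
-- ===== SOURCE B (Python) =====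
-- def shorten_to_unique_suffix(strings):
--     def common_prefix_len(a, b):
--         i = 0
--         for x, y in zip(a, b):
--             if x == y:
--                 i += 1
--             else:
--                 break
--         return i
--
--     def cut_pos(i, s):
--         # longest common prefix of s with any OTHER element, by direct scan
--         k = 0
--         for j, t in enumerate(strings):
--             if j != i:
--                 k = max(k, common_prefix_len(s, t))
--         return k
--
--     return [s[cut_pos(i, s):] for i, s in enumerate(strings)]
-- ===== Notes on version B (the rewrite author's own statement) =====
-- stated objective: simpler
-- what changed: Drops the sort and the index-tracking prefix_length array: for each element B directly scans all other elements and takes the maximum common-prefix length (a string's global max common prefix equals its max with a sorted neighbor), then cuts the same way.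
import Mathlib
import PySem

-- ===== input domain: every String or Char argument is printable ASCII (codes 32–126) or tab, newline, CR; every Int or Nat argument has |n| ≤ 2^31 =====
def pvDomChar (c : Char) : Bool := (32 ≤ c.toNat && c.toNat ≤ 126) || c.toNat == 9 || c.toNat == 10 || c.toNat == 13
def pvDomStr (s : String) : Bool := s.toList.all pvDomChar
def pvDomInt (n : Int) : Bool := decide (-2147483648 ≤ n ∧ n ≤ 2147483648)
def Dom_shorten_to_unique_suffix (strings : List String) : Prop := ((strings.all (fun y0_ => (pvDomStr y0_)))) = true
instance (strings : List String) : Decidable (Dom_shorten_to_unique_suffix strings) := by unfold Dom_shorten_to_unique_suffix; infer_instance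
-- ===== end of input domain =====

-- B replaces A's sort-then-adjacent-pairs pass by a direct all-pairs scan (no sort, no
-- index-tracking array); same return value, no mutation of the argument in either version.

-- ===== PORT A =====
-- shared helper: Python's common_prefix_len (zip + break on first mismatch), identical in A and B
def cpl : List Char → List Char → Nat
  | x :: xs, y :: ys => if x = y then cpl xs ys + 1 else 0
  | _, _ => 0

def shorten_to_unique_suffix (strings : List String) : List String :=
  let n : Int := strings.length
  let indexed := PySem.List.sorted (PySem.List.enumerate strings 0) (fun x => x.2) false
  let prefix_length : List Int := List.replicate strings.length 0
  let pl := (PySem.List.pyRange 0 (n - 1) 1).foldl (fun P i =>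
      let pr := PySem.List.pyGetD indexed i (0, "")
      let qr := PySem.List.pyGetD indexed (i + 1) (0, "")
      let v : Int := cpl pr.2.toList qr.2.toList
      let P1 := PySem.List.pySetD P pr.1 (max (PySem.List.pyGetD P pr.1 0) v)
      PySem.List.pySetD P1 qr.1 (max (PySem.List.pyGetD P1 qr.1 0) v)) prefix_length
  (PySem.List.enumerate strings 0).foldl (fun res is =>
      res ++ [PySem.Str.slice is.2 (some (PySem.List.pyGetD pl is.1 0)) none]) []

-- ===== PORT B =====
def shorten_to_unique_suffix_alt (strings : List String) : List String :=
  (PySem.List.enumerate strings 0).map (fun is =>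
    let k : Int := (PySem.List.enumerate strings 0).foldl (fun k jt =>
        if jt.1 ≠ is.1 then max k (cpl is.2.toList jt.2.toList) else k) 0
    PySem.Str.slice is.2 (some k) none)

-- ===== PRECONDITION & SPEC =====
def Spec_shorten_to_unique_suffix (strings : List String) (out : List String) : Prop := out = shorten_to_unique_suffix_alt strings
instance (strings : List String) (out : List String) : Decidable (Spec_shorten_to_unique_suffix strings out) := by unfold Spec_shorten_to_unique_suffix; infer_instance

-- ===== CLAIM (what is proved, stated in full; the proofs are below) =====
def Claim_equal_shorten_to_unique_suffix : Prop := ∀ (strings : List String), Dom_shorten_to_unique_suffix strings → Spec_shorten_to_unique_suffix strings (shorten_to_unique_suffix strings)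
-- ===== LEMMAS AND PROOFS =====

-- ---- order lemmas for common prefixes under the lexicographic order ----

theorem cpl_comm (a b : List Char) : cpl a b = cpl b a := by
  induction a generalizing b with
  | nil => cases b <;> simp [cpl]
  | cons x xs ih =>
    cases b with
    | nil => simp [cpl]
    | cons y ys =>
      by_cases h : x = y
      · subst h; simp [cpl, ih]
      · simp [cpl, h, Ne.symm h]

theorem cons_le_cons_iff' (x y : Char) (xs ys : List Char) :
    ((x::xs : List Char) ≤ y::ys) ↔ x < y ∨ (x = y ∧ xs ≤ ys) := by
  rw [← not_lt, List.cons_lt_cons_iff]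
  push Not
  constructor
  · rintro ⟨h1, h2⟩
    rcases lt_trichotomy x y with h | h | h
    · exact Or.inl h
    · exact Or.inr ⟨h, h2 h.symm⟩
    · exact absurd h1 (not_le.mpr h)
  · rintro (h | ⟨h, h'⟩)
    · exact ⟨h.le, fun he => absurd he.symm (ne_of_lt h)⟩
    · exact ⟨by simp [h], fun _ => h'⟩

theorem not_cons_le_nil (x : Char) (xs : List Char) : ¬ ((x::xs : List Char) ≤ []) :=
  not_le.mpr (List.nil_lt_cons x xs)

-- between two lexicographically ordered neighbours the common prefix can only grow
theorem cpl_mono (a b c : List Char) (hab : a ≤ b) (hbc : b ≤ c) :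
    cpl a c ≤ cpl a b ∧ cpl a c ≤ cpl b c := by
  induction a generalizing b c with
  | nil => simp [cpl]
  | cons x xs ih =>
    cases c with
    | nil => constructor <;> simp [cpl]
    | cons z cs =>
      by_cases hxz : x = z
      · subst hxz
        cases b with
        | nil => exact absurd hab (not_cons_le_nil x xs)
        | cons y bs =>
          rcases (cons_le_cons_iff' x y xs bs).mp hab with h | ⟨hxy, hxsbs⟩
          · rcases (cons_le_cons_iff' y x bs cs).mp hbc with h2 | ⟨hyx, _⟩
            · exact absurd (h.trans h2) (lt_irrefl x)
            · exact absurd (hyx ▸ h) (lt_irrefl x)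
          · subst hxy
            rcases (cons_le_cons_iff' x x bs cs).mp hbc with h2 | ⟨_, hbscs⟩
            · exact absurd h2 (lt_irrefl x)
            · obtain ⟨h1, h2⟩ := ih bs cs hxsbs hbscs
              constructor <;> simp [cpl, h1, h2]
      · simp [cpl, hxz]

-- ---- port A's range loop is a fold over adjacent pairs ----

theorem foldl_range_zip {α β : Type} (d : α) (f : β → α → α → β) :
    ∀ (xs : List α) (init : β),
    (List.range (xs.length - 1)).foldl (fun acc k => f acc (xs.getD k d) (xs.getD (k+1) d)) init
      = (xs.zip xs.tail).foldl (fun acc pq => f acc pq.1 pq.2) init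
  | [], _ => rfl
  | [_], _ => rfl
  | x :: y :: rest, init => by
    have hlen : (x :: y :: rest).length - 1 = rest.length + 1 := by simp
    rw [hlen, List.range_succ_eq_map, List.foldl_cons, List.foldl_map]
    have := foldl_range_zip d f (y :: rest) (f init x y)
    simp only [List.length_cons, Nat.add_sub_cancel] at this
    simpa [List.getD_cons_succ, List.getD_cons_zero] using this

theorem foldl_pyRange_zip {α β : Type} (d : α) (f : β → α → α → β) (xs : List α) (init : β) :
    (PySem.List.pyRange 0 ((xs.length : Int) - 1) 1).foldl
        (fun acc i => f acc (PySem.List.pyGetD xs i d) (PySem.List.pyGetD xs (i+1) d)) init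
      = (xs.zip xs.tail).foldl (fun acc pq => f acc pq.1 pq.2) init := by
  rw [PySem.List.pyRange_one, List.foldl_map]
  have h : ((xs.length : Int) - 1 - 0).toNat = xs.length - 1 := by omega
  rw [h, ← foldl_range_zip d f xs init]
  congr 1
  funext acc k
  have h2 : ((k : Int) + 1) = ((k + 1 : Nat) : Int) := by push_cast; ring
  simp only [zero_add, h2, PySem.List.pyGetD_natCast]

-- ---- the state of port A's update loop ----

def aStep (P : List Int) (p q : Int × String) : List Int :=
  let v : Int := cpl p.2.toList q.2.toList
  let P1 := PySem.List.pySetD P p.1 (max (PySem.List.pyGetD P p.1 0) v)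
  PySem.List.pySetD P1 q.1 (max (PySem.List.pyGetD P1 q.1 0) v)

theorem getD_set_nat (P : List Int) (a i : Nat) (w d : Int) (ha : a < P.length) :
    (P.set a w).getD i d = if i = a then w else P.getD i d := by
  by_cases h : i = a
  · subst h; simp [List.getD, ha]
  · simp [List.getD, Ne.symm h, h]

theorem fold_inv (n : Nat) (ps : List ((Int × String) × (Int × String)))
    (hps : ∀ pq ∈ ps, (∃ a, a < n ∧ pq.1.1 = (a : Int)) ∧ (∃ b, b < n ∧ pq.2.1 = (b : Int)))
    (g : Nat → Nat) (P : List Int) (hlen : P.length = n)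
    (hP : ∀ i, i < n → PySem.List.pyGetD P (i : Int) 0 = ((g i : Nat) : Int)) :
    (ps.foldl (fun P pq => aStep P pq.1 pq.2) P).length = n ∧
    ∀ i, i < n → PySem.List.pyGetD (ps.foldl (fun P pq => aStep P pq.1 pq.2) P) (i : Int) 0
      = ((ps.foldl (fun m pq =>
            if pq.1.1 = (i : Int) ∨ pq.2.1 = (i : Int) then
              max m (cpl pq.1.2.toList pq.2.2.toList) else m) (g i) : Nat) : Int) := by
  induction ps generalizing g P with
  | nil => exact ⟨hlen, fun i hi => by simpa using hP i hi⟩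
  | cons pq rest ih =>
    obtain ⟨⟨a, ha, hpa⟩, ⟨b, hb, hpb⟩⟩ := hps pq (by simp)
    set v : Nat := cpl pq.1.2.toList pq.2.2.toList with hv
    have hstep : aStep P pq.1 pq.2 =
        (P.set a (max (g a) v)).set b (max (if b = a then max (g a) v else g b) v) := by
      unfold aStep
      rw [hpa, hpb]
      simp only [PySem.List.pySetD_natCast, PySem.List.pyGetD_natCast]
      have hPa : P.getD a 0 = ((g a : Nat) : Int) := by simpa using hP a ha
      have hPb : P.getD b 0 = ((g b : Nat) : Int) := by simpa using hP b hb
      rw [hPa]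
      have h1 : ((P.set a (max ((g a : Nat) : Int) ((v : Nat) : Int))).getD b 0)
          = if b = a then max ((g a : Nat) : Int) ((v : Nat) : Int) else ((g b : Nat) : Int) := by
        rw [getD_set_nat P a b _ 0 (by omega)]
        split_ifs with h
        · rfl
        · exact hPb
      push_cast at h1 ⊢
      rw [h1]
    have hg' : ∀ i, i < n → PySem.List.pyGetD (aStep P pq.1 pq.2) (i : Int) 0
        = (((if pq.1.1 = (i : Int) ∨ pq.2.1 = (i : Int) then max (g i) v else g i : Nat)) : Int) := by
      intro i hi
      rw [hstep]
      rw [PySem.List.pyGetD_natCast]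
      rw [getD_set_nat _ b i _ 0 (by simp; omega)]
      rw [getD_set_nat P a i _ 0 (by omega)]
      have hia : (pq.1.1 = (i : Int)) ↔ (i = a) := by rw [hpa]; constructor <;> (intro h; omega)
      have hib : (pq.2.1 = (i : Int)) ↔ (i = b) := by rw [hpb]; constructor <;> (intro h; omega)
      simp only [hia, hib]
      by_cases h1 : i = b
      · subst h1
        by_cases h2 : i = a <;> simp [h2]
      · by_cases h2 : i = a
        · subst h2; simp [h1]
        · simp only [h1, h2, or_self, if_false]
          simpa using hP i hi
    have hlen' : (aStep P pq.1 pq.2).length = n := by rw [hstep]; simp [hlen]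
    obtain ⟨L1, L2⟩ := ih (fun pq hpq => hps pq (by simp [hpq]))
      (fun i => if pq.1.1 = (i : Int) ∨ pq.2.1 = (i : Int) then max (g i) v else g i)
      (aStep P pq.1 pq.2) hlen' hg'
    refine ⟨by simpa using L1, fun i hi => ?_⟩
    simpa using L2 i hi
theorem init_le_foldl_ifmax {α : Type} (L : List α) (c : α → Prop) [DecidablePred c]
    (h : α → Nat) (m : Nat) :
    m ≤ L.foldl (fun acc x => if c x then max acc (h x) else acc) m := by
  induction L generalizing m with
  | nil => simp
  | cons y ys ih =>
    simp only [List.foldl_cons]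
    split_ifs
    · exact le_trans (le_max_left _ _) (ih _)
    · exact ih _

theorem le_foldl_ifmax {α : Type} (L : List α) (c : α → Prop) [DecidablePred c]
    (h : α → Nat) (m : Nat) (x : α) (hc : c x) (hx : x ∈ L) :
    h x ≤ L.foldl (fun acc x => if c x then max acc (h x) else acc) m := by
  induction L generalizing m with
  | nil => cases hx
  | cons y ys ih =>
    rcases List.mem_cons.mp hx with he | he
    · subst he
      simp only [List.foldl_cons, if_pos hc]
      exact le_trans (le_max_right _ _) (init_le_foldl_ifmax ys c h _)
    · simp only [List.foldl_cons]
      exact ih _ he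


theorem foldl_ifmax_le {α : Type} (L : List α) (c : α → Prop) [DecidablePred c]
    (h : α → Nat) (k m : Nat) (hm : m ≤ k) (hb : ∀ x ∈ L, c x → h x ≤ k) :
    L.foldl (fun acc x => if c x then max acc (h x) else acc) m ≤ k := by
  induction L generalizing m with
  | nil => exact hm
  | cons y ys ih =>
    simp only [List.foldl_cons]
    split_ifs with hcy
    · exact ih _ (max_le hm (hb y (by simp) hcy)) (fun x hx hcx => hb x (by simp [hx]) hcx)
    · exact ih _ hm (fun x hx hcx => hb x (by simp [hx]) hcx)
-- ---- positions in a zip with the tail ----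

theorem getElem_idx_congr {α : Type} (t : List α) (k1 k2 : Nat) (h1 : k1 < t.length)
    (h : k1 = k2) : t[k1]'h1 = t[k2]'(h ▸ h1) := by subst h; rfl

theorem mem_zip_tail {α : Type} (t : List α) (pq : α × α) (h : pq ∈ t.zip t.tail) :
    ∃ k, ∃ hk : k + 1 < t.length, pq.1 = t[k] ∧ pq.2 = t[k+1] := by
  obtain ⟨k, hk, he⟩ := List.getElem_of_mem h
  have hk' : k + 1 < t.length := by
    simp [List.length_zip, List.length_tail] at hk
    omega
  refine ⟨k, hk', ?_, ?_⟩
  · rw [← he]; simp [List.getElem_zip]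
  · rw [← he]; simp [List.getElem_zip, List.getElem_tail]

-- ---- the central equality: sorted-neighbour maxima = all-pairs maxima ----

theorem core_eq (l : List String) (i : Nat) (hi : i < l.length) :
    (((PySem.List.sorted (PySem.List.enumerate l 0) (fun x => x.2) false).zip
       (PySem.List.sorted (PySem.List.enumerate l 0) (fun x => x.2) false).tail).foldl
      (fun m pq => if pq.1.1 = (i : Int) ∨ pq.2.1 = (i : Int) then
          max m (cpl pq.1.2.toList pq.2.2.toList) else m) 0)
    = ((PySem.List.enumerate l 0).foldl
        (fun k jt => if jt.1 ≠ (i : Int) then max k (cpl (l[i]'hi).toList jt.2.toList) else k) 0) := by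
  set E := PySem.List.enumerate l 0 with hE
  set t := PySem.List.sorted E (fun x => x.2) false with ht
  have hperm : t.Perm E := PySem.List.sorted_perm E _ _
  have hmem : ∀ x ∈ t, ∃ k, ∃ hk : k < l.length, x = ((k : Int), l[k]) := by
    intro x hx
    rw [ht, PySem.List.mem_sorted, hE, PySem.List.mem_enumerate_iff] at hx
    obtain ⟨k, hk, he⟩ := hx
    exact ⟨k, hk, by simpa using he⟩
  have hpair2 : t.Pairwise (fun a b => a.2 ≤ b.2) := PySem.List.sorted_pairwise E _
  have hpair1 : t.Pairwise (fun a b => a.1 ≠ b.1) := by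
    rw [hperm.pairwise_iff (fun {x y} (h : x.1 ≠ y.1) => h.symm)]
    exact (PySem.List.pairwise_lt_enumerate l 0).imp (fun h => ne_of_lt h)
  have hmemt : ∀ j, (hj : j < l.length) → ((j : Int), l[j]) ∈ t := by
    intro j hj
    rw [ht, PySem.List.mem_sorted, hE, PySem.List.mem_enumerate_iff]
    exact ⟨j, hj, by simp⟩
  have hpairwise := List.pairwise_iff_getElem.mp hpair2
  apply le_antisymm
  · -- each adjacent contribution is bounded by the all-pairs maximum
    refine foldl_ifmax_le (t.zip t.tail)
      (fun pq => pq.1.1 = (i : Int) ∨ pq.2.1 = (i : Int))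
      (fun pq => cpl pq.1.2.toList pq.2.2.toList) _ 0 (Nat.zero_le _) ?_
    intro pq hpq hcond
    obtain ⟨k, hk, hp1, hp2⟩ := mem_zip_tail t pq hpq
    obtain ⟨a, hal, hae⟩ := hmem t[k] (List.getElem_mem _)
    obtain ⟨b, hbl, hbe⟩ := hmem (t[k+1]'hk) (List.getElem_mem _)
    have hne : (t[k]'(by omega)).1 ≠ (t[k+1]'hk).1 :=
      (List.pairwise_iff_getElem.mp hpair1) k (k+1) (by omega) hk (by omega)
    have hab : a ≠ b := by
      rw [hae, hbe] at hne
      exact fun h => hne (by simp [h])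
    rcases hcond with hcl | hcr
    · have hai : a = i := by
        have hcast : (a : Int) = (i : Int) := by rw [hp1, hae] at hcl; simpa using hcl
        exact_mod_cast hcast
      subst hai
      show cpl pq.1.2.toList pq.2.2.toList ≤ _
      have hgoal : cpl pq.1.2.toList pq.2.2.toList = cpl (l[a]'hi).toList (l[b]'hbl).toList := by
        rw [hp1, hp2, hae, hbe]
      rw [hgoal]
      exact le_foldl_ifmax E (fun jt => jt.1 ≠ (a : Int))
        (fun jt => cpl (l[a]'hi).toList jt.2.toList) 0 ((b : Int), l[b]'hbl)
        (by intro h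
            have : (b : Int) = (a : Int) := by simpa using h
            exact hab (by exact_mod_cast this.symm))
        (by rw [hE, PySem.List.mem_enumerate_iff]; exact ⟨b, hbl, by simp⟩)
    · have hbi : b = i := by
        have hcast : (b : Int) = (i : Int) := by rw [hp2, hbe] at hcr; simpa using hcr
        exact_mod_cast hcast
      subst hbi
      show cpl pq.1.2.toList pq.2.2.toList ≤ _
      have hgoal : cpl pq.1.2.toList pq.2.2.toList = cpl (l[b]'hi).toList (l[a]'hal).toList := by
        rw [hp1, hp2, hae, hbe, cpl_comm]
      rw [hgoal]
      exact le_foldl_ifmax E (fun jt => jt.1 ≠ (b : Int))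
        (fun jt => cpl (l[b]'hi).toList jt.2.toList) 0 ((a : Int), l[a]'hal)
        (by intro h
            have : (a : Int) = (b : Int) := by simpa using h
            exact hab (by exact_mod_cast this))
        (by rw [hE, PySem.List.mem_enumerate_iff]; exact ⟨a, hal, by simp⟩)
  · -- each all-pairs contribution is bounded by some adjacent contribution
    refine foldl_ifmax_le E (fun jt => jt.1 ≠ (i : Int))
      (fun jt => cpl (l[i]'hi).toList jt.2.toList) _ 0 (Nat.zero_le _) ?_
    intro jt hjt hcond
    show cpl (l[i]'hi).toList jt.2.toList ≤ _
    rw [hE, PySem.List.mem_enumerate_iff] at hjt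
    obtain ⟨j, hjl, hje⟩ := hjt
    have hji : j ≠ i := by
      intro h; exact hcond (by rw [hje]; simp [h])
    obtain ⟨kp, hkp, hkpe⟩ := List.getElem_of_mem (hmemt i hi)
    obtain ⟨kq, hkq, hkqe⟩ := List.getElem_of_mem (hmemt j hjl)
    have hkpq : kp ≠ kq := by
      intro h
      subst h
      rw [hkpe] at hkqe
      have hfst := congrArg Prod.fst hkqe
      simp at hfst
      omega
    have hyv : cpl (l[i]'hi).toList jt.2.toList
        = cpl (t[kp]'hkp).2.toList (t[kq]'hkq).2.toList := by
      rw [hkpe, hkqe, hje]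
    rcases Nat.lt_or_ge kp kq with hlt | hge
    · have hk1 : kp + 1 < t.length := by omega
      have hab : (t[kp]'hkp).2 ≤ (t[kp+1]'hk1).2 := hpairwise kp (kp+1) hkp hk1 (by omega)
      have hbc : (t[kp+1]'hk1).2 ≤ (t[kq]'hkq).2 := by
        rcases Nat.lt_or_ge (kp+1) kq with h | h
        · exact hpairwise (kp+1) kq hk1 hkq h
        · exact le_of_eq (congrArg Prod.snd (getElem_idx_congr t (kp+1) kq hk1 (by omega)))
      have hbound : cpl (l[i]'hi).toList jt.2.toList
          ≤ cpl (t[kp]'hkp).2.toList ((t[kp+1]'hk1).2).toList := by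
        rw [hyv]
        exact (cpl_mono _ _ _ (String.le_iff_toList_le.mp hab)
          (String.le_iff_toList_le.mp hbc)).1
      refine le_trans hbound ?_
      have hzl : kp < (t.zip t.tail).length := by
        simp [List.length_zip, List.length_tail]; omega
      have hpair_mem : ((t[kp]'hkp, t[kp+1]'hk1) : _ × _) ∈ t.zip t.tail := by
        have he : (t.zip t.tail)[kp]'hzl = (t[kp]'hkp, t[kp+1]'hk1) := by
          simp [List.getElem_zip, List.getElem_tail]
        rw [← he]
        exact List.getElem_mem _
      exact le_foldl_ifmax (t.zip t.tail)
        (fun pq => pq.1.1 = (i : Int) ∨ pq.2.1 = (i : Int))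
        (fun pq => cpl pq.1.2.toList pq.2.2.toList) 0 _
        (Or.inl (by rw [hkpe])) hpair_mem
    · have hqlt : kq < kp := by omega
      have hk0 : kp - 1 + 1 < t.length := by omega
      have hkm1 : kp - 1 < t.length := by omega
      have hkm : kp - 1 + 1 = kp := by omega
      have hab : (t[kq]'hkq).2 ≤ (t[kp-1]'hkm1).2 := by
        rcases Nat.lt_or_ge kq (kp - 1) with h | h
        · exact hpairwise kq (kp-1) hkq hkm1 h
        · exact le_of_eq (congrArg Prod.snd (getElem_idx_congr t kq (kp-1) hkq (by omega)))
      have hbc : (t[kp-1]'hkm1).2 ≤ (t[kp]'hkp).2 := hpairwise (kp-1) kp hkm1 hkp (by omega)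
      have hbound : cpl (l[i]'hi).toList jt.2.toList
          ≤ cpl ((t[kp-1]'hkm1).2).toList ((t[kp]'hkp).2).toList := by
        rw [hyv, cpl_comm]
        exact (cpl_mono _ _ _ (String.le_iff_toList_le.mp hab)
          (String.le_iff_toList_le.mp hbc)).2
      refine le_trans hbound ?_
      have hzl : kp - 1 < (t.zip t.tail).length := by
        simp [List.length_zip, List.length_tail]; omega
      have hpair_mem : ((t[kp-1]'hkm1, t[kp]'hkp) : _ × _) ∈ t.zip t.tail := by
        have he : (t.zip t.tail)[kp-1]'hzl = (t[kp-1]'hkm1, t[kp]'hkp) := by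
          simp only [List.getElem_zip, List.getElem_tail]
          exact Prod.ext rfl (congrArg id (getElem_idx_congr t (kp-1+1) kp hk0 (by omega)))
        rw [← he]
        exact List.getElem_mem _
      exact le_foldl_ifmax (t.zip t.tail)
        (fun pq => pq.1.1 = (i : Int) ∨ pq.2.1 = (i : Int))
        (fun pq => cpl pq.1.2.toList pq.2.2.toList) 0 _
        (Or.inr (by rw [hkpe])) hpair_mem
-- ---- bridging B's Int-valued fold to the Nat-valued fold ----

theorem bfold_cast (E : List (Int × String)) (s : String) (iv : Int) :
    E.foldl (fun (k : Int) jt =>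
        if jt.1 ≠ iv then max k ((cpl s.toList jt.2.toList : Nat) : Int) else k) 0
      = ((E.foldl (fun k jt =>
          if jt.1 ≠ iv then max k (cpl s.toList jt.2.toList) else k) 0 : Nat) : Int) := by
  suffices h : ∀ m : Nat,
      E.foldl (fun (k : Int) jt =>
        if jt.1 ≠ iv then max k ((cpl s.toList jt.2.toList : Nat) : Int) else k) (m : Nat)
      = ((E.foldl (fun k jt =>
          if jt.1 ≠ iv then max k (cpl s.toList jt.2.toList) else k) m : Nat) : Int) by
    simpa using h 0
  intro m
  induction E generalizing m with
  | nil => rfl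
  | cons y ys ih =>
    by_cases hc : y.1 ≠ iv
    · simpa [hc, Nat.cast_max] using ih (max m (cpl s.toList y.2.toList))
    · have hc' : y.1 = iv := not_ne_iff.mp hc
      simpa [hc'] using ih m

-- ---- assembling the two ports ----

theorem shorten_eq (l : List String) :
    shorten_to_unique_suffix l = shorten_to_unique_suffix_alt l := by
  show (PySem.List.enumerate l 0).foldl (fun res is => res ++
        [PySem.Str.slice is.2 (some (PySem.List.pyGetD
          ((PySem.List.pyRange 0 ((l.length : Int) - 1) 1).foldl
            (fun P i => aStep P
              (PySem.List.pyGetD (PySem.List.sorted (PySem.List.enumerate l 0) (fun x => x.2) false) i (0, ""))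
              (PySem.List.pyGetD (PySem.List.sorted (PySem.List.enumerate l 0) (fun x => x.2) false) (i+1) (0, "")))
            (List.replicate l.length 0))
          is.1 0)) none]) []
    = (PySem.List.enumerate l 0).map (fun is =>
        PySem.Str.slice is.2 (some ((PySem.List.enumerate l 0).foldl
          (fun k jt => if jt.1 ≠ is.1 then max k ((cpl is.2.toList jt.2.toList : Nat) : Int) else k) 0)) none)
  set E := PySem.List.enumerate l 0 with hE
  set t := PySem.List.sorted E (fun x => x.2) false with ht
  have hlt : t.length = l.length := by
    rw [ht, PySem.List.length_sorted, hE, PySem.List.length_enumerate]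
  have hloop : ((PySem.List.pyRange 0 ((l.length : Int) - 1) 1).foldl
      (fun P i => aStep P (PySem.List.pyGetD t i (0, "")) (PySem.List.pyGetD t (i+1) (0, "")))
      (List.replicate l.length 0))
      = (t.zip t.tail).foldl (fun P pq => aStep P pq.1 pq.2) (List.replicate l.length 0) := by
    have h := foldl_pyRange_zip ((0 : Int), "") (fun P p q => aStep P p q) t
      (List.replicate l.length (0 : Int))
    rw [hlt] at h
    exact h
  rw [hloop, PySem.List.foldl_append_singleton_eq_map]
  apply List.map_congr_left
  intro is his
  rw [hE, PySem.List.mem_enumerate_iff] at his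
  obtain ⟨i, hi, hie⟩ := his
  subst hie
  simp only [zero_add]
  have hps : ∀ pq ∈ t.zip t.tail,
      (∃ a, a < l.length ∧ (pq.1).1 = (a : Int)) ∧ (∃ b, b < l.length ∧ (pq.2).1 = (b : Int)) := by
    intro pq hpq
    obtain ⟨h1, h2⟩ := List.of_mem_zip hpq
    have hm : ∀ x ∈ t, ∃ k, k < l.length ∧ x.1 = (k : Int) := by
      intro x hx
      rw [ht, PySem.List.mem_sorted, hE, PySem.List.mem_enumerate_iff] at hx
      obtain ⟨k, hk, he⟩ := hx
      exact ⟨k, hk, by rw [he]; simp⟩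
    exact ⟨hm _ h1, hm _ (List.mem_of_mem_tail h2)⟩
  obtain ⟨hlen, hval⟩ := fold_inv l.length (t.zip t.tail) hps (fun _ => 0)
    (List.replicate l.length 0) (by simp)
    (fun j hj => by simp [PySem.List.pyGetD_natCast, List.getD, hj])
  rw [hval i hi, bfold_cast E (l[i]'hi) (i : Int)]
  have hcore := core_eq l i hi
  rw [← hE, ← ht] at hcore
  rw [hcore]

-- ===== VERDICT (by name: the statement is the Claim_ definition above) =====
theorem shorten_to_unique_suffix_spec : Claim_equal_shorten_to_unique_suffix := by
  intro strings _
  exact shorten_eq strings
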